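-- pv_equiv track=rewrite | github.com/nobe0716/problem_solving | codejam/2018/kickstart/g/brute-force.py | count_triplet
-- ===== SOURCE A (Python) =====
-- def count_triplet(n, nums):
--     r = 0
--     for i in range(n - 2):
--
--         for j in range(i + 1, n - 1):
--             for k in range(j + 1, n):
--                 if nums[i] * nums[j] == nums[k] or nums[j] * nums[k] == nums[i] or nums[k] * nums[i] == nums[j]:
--                     r += 1
--     return r
-- ===== SOURCE B (Python) =====
-- def _targets(a, b):
--     # values x with x*a == b or a*b == x or b*x == a (given not both a,b zero)
--     ts = {a * b}
--     if a != 0 and b % a == 0: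
--         ts.add(b // a)
--     if b != 0 and a % b == 0:
--         ts.add(a // b)
--     return ts
--
--
-- def count_triplet(n, nums):
--     if n < 3:
--         return 0
--     xs = nums[:n]
--     cnt = {}
--     total = 0
--     for j in range(len(xs)):
--         a = xs[j]
--         for k in range(j + 1, len(xs)):
--             b = xs[k]
--             if a == 0 and b == 0:
--                 total += j
--             else:
--                 for t in _targets(a, b):
--                     total += cnt.get(t, 0)
--         cnt[a] = cnt.get(a, 0) + 1
--     return total
-- ===== Notes on version B (the rewrite author's own statement) =====
-- stated objective: faster
-- what changed: Replaced the triple nested index loop by an O(n^2) pass over pairs (j,k) that keeps a running frequency dict of earlier values and looks up the (at most three, deduplicated) values that would complete the triple.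
import Mathlib
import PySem

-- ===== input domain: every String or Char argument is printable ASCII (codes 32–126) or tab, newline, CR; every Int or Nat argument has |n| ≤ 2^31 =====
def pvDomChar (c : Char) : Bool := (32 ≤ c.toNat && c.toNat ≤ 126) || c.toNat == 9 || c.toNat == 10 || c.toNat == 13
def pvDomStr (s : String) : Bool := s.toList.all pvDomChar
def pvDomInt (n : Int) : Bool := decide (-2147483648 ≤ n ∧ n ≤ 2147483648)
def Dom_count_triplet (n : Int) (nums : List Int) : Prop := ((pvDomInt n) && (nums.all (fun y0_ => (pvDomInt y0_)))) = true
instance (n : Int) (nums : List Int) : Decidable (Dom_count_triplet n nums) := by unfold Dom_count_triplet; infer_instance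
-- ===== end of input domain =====

-- B replaces A's cubic triple loop by a quadratic pair loop with a running frequency dict (objective: faster); equivalence is claimed on Pre_ (A raises IndexError outside it).

-- ===== PORT A =====
def count_triplet (n : Int) (nums : List Int) : Int :=
  (PySem.List.pyRange 0 (n - 2) 1).foldl (fun r i =>
    (PySem.List.pyRange (i + 1) (n - 1) 1).foldl (fun r j =>
      (PySem.List.pyRange (j + 1) n 1).foldl (fun r k =>
        if PySem.List.pyGetD nums i 0 * PySem.List.pyGetD nums j 0 = PySem.List.pyGetD nums k 0
            ∨ PySem.List.pyGetD nums j 0 * PySem.List.pyGetD nums k 0 = PySem.List.pyGetD nums i 0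
            ∨ PySem.List.pyGetD nums k 0 * PySem.List.pyGetD nums i 0 = PySem.List.pyGetD nums j 0
        then r + 1 else r) r) r) 0

-- ===== PORT B =====
-- helper _targets(a, b) of Source B: the candidate completing values, as a Python set
def pvTargets (a b : Int) : PySem.Set Int :=
  let ts := PySem.Set.ofList [a * b]
  let ts := if a ≠ 0 ∧ PySem.Int.mod b a = 0 then PySem.Set.add ts (PySem.Int.floordiv b a) else ts
  if b ≠ 0 ∧ PySem.Int.mod a b = 0 then PySem.Set.add ts (PySem.Int.floordiv a b) else ts

def count_triplet_alt (n : Int) (nums : List Int) : Int :=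
  if n < 3 then 0
  else
    let xs := PySem.List.slice nums none (some n)
    let st := (PySem.List.pyRange 0 (xs.length : Int) 1).foldl
      (fun (st : PySem.Dict Int Int × Int) j =>
        let cnt := st.1
        let a := PySem.List.pyGetD xs j 0
        let total := (PySem.List.pyRange (j + 1) (xs.length : Int) 1).foldl
          (fun total k =>
            let b := PySem.List.pyGetD xs k 0
            if a = 0 ∧ b = 0 then total + j
            else (pvTargets a b).foldl (fun tot t => tot + cnt.getD t 0) total)
          st.2
        (cnt.insert a (cnt.getD a 0 + 1), total))
      (PySem.Dict.empty, 0)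
    st.2

-- ===== PRECONDITION & SPEC =====
-- A indexes nums[0..n-1] as soon as n ≥ 3, so it raises IndexError iff 3 ≤ n and nums is shorter than n; Pre_ excludes exactly those inputs.
def Pre_count_triplet (n : Int) (nums : List Int) : Prop := 3 ≤ n → n ≤ (nums.length : Int)
instance (n : Int) (nums : List Int) : Decidable (Pre_count_triplet n nums) := by unfold Pre_count_triplet; infer_instance
def pvWitness_count_triplet : Int × List Int := (3, [2, 3, 6])

def Spec_count_triplet (n : Int) (nums : List Int) (out : Int) : Prop := out = count_triplet_alt n nums
instance (n : Int) (nums : List Int) (out : Int) : Decidable (Spec_count_triplet n nums out) := by unfold Spec_count_triplet; infer_instance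

-- ===== CLAIM (what is proved, stated in full; the proofs are below) =====
def Claim_equal_count_triplet : Prop := ∀ (n : Int) (nums : List Int), Dom_count_triplet n nums → Pre_count_triplet n nums → Spec_count_triplet n nums (count_triplet n nums)

-- ===== LEMMAS AND PROOFS =====

-- the triple condition of A, as a predicate on the three values
abbrev pvP (x a b : Int) : Prop := x * a = b ∨ a * b = x ∨ b * x = a

-- value of B's inner-loop body for pair (j, k) (dict already identified with counts of xs[:j])
def pvTerm (xs : List Int) (j k : Int) : Int :=
  if PySem.List.pyGetD xs j 0 = 0 ∧ PySem.List.pyGetD xs k 0 = 0 then j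
  else ((pvTargets (PySem.List.pyGetD xs j 0) (PySem.List.pyGetD xs k 0)).map
        (fun t => ((xs.take j.toNat).count t : Int))).sum

-- total contribution of B's iteration j
def pvC (xs : List Int) (j : Int) : Int :=
  ((PySem.List.pyRange (j+1) (xs.length : Int) 1).map (pvTerm xs j)).sum

lemma sum_pyRange (a b : Int) (g : Int → Int) :
    ((PySem.List.pyRange a b 1).map g).sum = ∑ x ∈ Finset.Ico a b, g x := by
  rw [← List.sum_toFinset _ (PySem.List.nodup_pyRange_one a b)]
  congr 1
  ext x
  simp [PySem.List.mem_pyRange_one]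

lemma countP_pyRange_cast (a b : Int) (p : Int → Prop) [DecidablePred p] :
    (((PySem.List.pyRange a b 1).countP (fun x => decide (p x)) : Int)) =
      ∑ x ∈ Finset.Ico a b, if p x then 1 else 0 := by
  rw [← sum_pyRange, ← PySem.List.sum_map_ite_one_zero]
  congr 1
  apply List.map_congr_left
  intro x _
  by_cases h : p x <;> simp [h]

lemma sum_Ico_int_eq_range (m : Nat) (f : Int → Int) :
    ∑ x ∈ Finset.Ico (0:Int) (m:Int), f x = ∑ i ∈ Finset.range m, f (i:Int) := by
  have h := Finset.sum_map (Finset.range m) ⟨(Nat.cast : ℕ → ℤ), Nat.cast_injective⟩ f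
  simp only [Function.Embedding.coeFn_mk] at h
  rw [← h]
  congr 1
  ext x
  simp only [Finset.mem_map, Finset.mem_Ico, Finset.mem_range, Function.Embedding.coeFn_mk]
  constructor
  · rintro ⟨h0, hm⟩
    exact ⟨x.toNat, by omega, by omega⟩
  · rintro ⟨i, hi, rfl⟩
    omega

lemma sum_Ico_extend (f : Int → Int) (a b c : Int) (h0 : 0 ≤ a) (hbc : b ≤ c) :
    ∑ x ∈ Finset.Ico a b, f x = ∑ x ∈ Finset.Ico (0:Int) c, if a ≤ x ∧ x < b then f x else 0 := by
  rw [← Finset.sum_filter]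
  congr 1
  ext x
  simp only [Finset.mem_Ico, Finset.mem_filter]
  omega

-- A's value as a triple sum of indicators over index ranges
lemma A_eq_sum (n : Int) (nums : List Int) :
    count_triplet n nums =
      ∑ i ∈ Finset.Ico (0:Int) (n-2), ∑ j ∈ Finset.Ico (i+1) (n-1), ∑ k ∈ Finset.Ico (j+1) n,
        (if pvP (PySem.List.pyGetD nums i 0) (PySem.List.pyGetD nums j 0) (PySem.List.pyGetD nums k 0)
         then 1 else 0) := by
  unfold count_triplet
  simp only [PySem.List.foldl_ite_add_one, PySem.List.foldl_add, zero_add, sum_pyRange]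
  refine Finset.sum_congr rfl (fun i _ => Finset.sum_congr rfl (fun j _ => ?_))
  rw [← countP_pyRange_cast (j+1) n (fun k => pvP (PySem.List.pyGetD nums i 0) (PySem.List.pyGetD nums j 0) (PySem.List.pyGetD nums k 0))]

lemma nodup_pvTargets (a b : Int) : (pvTargets a b).Nodup := by
  unfold pvTargets
  split_ifs <;>
    first
      | exact PySem.Set.nodup_add _ _ (PySem.Set.nodup_add _ _ (PySem.Set.nodup_ofList _))
      | exact PySem.Set.nodup_add _ _ (PySem.Set.nodup_ofList _)
      | exact PySem.Set.nodup_ofList _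

lemma fd_mul (a b : Int) (hd : a ∣ b) : PySem.Int.floordiv b a * a = b := by
  have h := PySem.Int.floordiv_mul_add_mod b a
  have hm : PySem.Int.mod b a = 0 := (PySem.Int.mod_eq_zero_iff_dvd b a).mpr hd
  omega

lemma mem_pvTargets_raw (a b x : Int) :
    x ∈ pvTargets a b ↔ x = a * b ∨
      ((a ≠ 0 ∧ PySem.Int.mod b a = 0) ∧ x = PySem.Int.floordiv b a) ∨
      ((b ≠ 0 ∧ PySem.Int.mod a b = 0) ∧ x = PySem.Int.floordiv a b) := by
  unfold pvTargets
  split_ifs with h1 h2 h2 <;>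
    · simp only [PySem.Set.mem_add, PySem.Set.mem_ofList, List.mem_singleton]
      tauto

-- targets characterizes exactly the values completing a triple (outside the all-zero case)
lemma mem_pvTargets (a b x : Int) (h : ¬(a = 0 ∧ b = 0)) :
    x ∈ pvTargets a b ↔ pvP x a b := by
  rw [mem_pvTargets_raw]
  unfold pvP
  constructor
  · rintro (hx | ⟨⟨ha, hm⟩, hx⟩ | ⟨⟨hb, hm⟩, hx⟩)
    · exact Or.inr (Or.inl hx.symm)
    · exact Or.inl (by rw [hx, fd_mul a b ((PySem.Int.mod_eq_zero_iff_dvd b a).mp hm)])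
    · exact Or.inr (Or.inr (by rw [hx, mul_comm, fd_mul b a ((PySem.Int.mod_eq_zero_iff_dvd a b).mp hm)]))
  · rintro (hp | hp | hp)
    · by_cases ha : a = 0
      · exact absurd ⟨ha, by rw [← hp, ha, mul_zero]⟩ h
      · have hdvd : a ∣ b := ⟨x, by rw [← hp, mul_comm]⟩
        refine Or.inr (Or.inl ⟨⟨ha, (PySem.Int.mod_eq_zero_iff_dvd b a).mpr hdvd⟩, ?_⟩)
        have h1 := fd_mul a b hdvd
        have h2 : x * a = PySem.Int.floordiv b a * a := by omega
        exact mul_right_cancel₀ ha h2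
    · exact Or.inl hp.symm
    · by_cases hb : b = 0
      · exact absurd ⟨by rw [← hp, hb, zero_mul], hb⟩ h
      · have hdvd : b ∣ a := ⟨x, hp.symm⟩
        refine Or.inr (Or.inr ⟨⟨hb, (PySem.Int.mod_eq_zero_iff_dvd a b).mpr hdvd⟩, ?_⟩)
        have h1 := fd_mul b a hdvd
        have h2 : x * b = PySem.Int.floordiv a b * b := by
          rw [h1, ← hp]; ring
        exact mul_right_cancel₀ hb h2

lemma countP_mem_cons (t : Int) (ts pre : List Int) (h : t ∉ ts) :
    pre.countP (fun x => decide (x ∈ t :: ts)) =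
      pre.count t + pre.countP (fun x => decide (x ∈ ts)) := by
  induction pre with
  | nil => simp
  | cons y pre ih =>
    simp only [List.countP_cons, List.count_cons, ih]
    by_cases hyt : y = t
    · subst hyt
      simp [h]
      omega
    · by_cases hys : y ∈ ts <;> simp [hyt, hys] <;> omega

-- summing per-value counts over a duplicate-free list = one filtered count
lemma sum_counts (ts pre : List Int) (h : ts.Nodup) :
    (ts.map (fun t => (pre.count t : Int))).sum =
      (pre.countP (fun x => decide (x ∈ ts)) : Int) := by
  induction ts with
  | nil => simp
  | cons t ts ih =>
    rcases List.nodup_cons.mp h with ⟨ht, hnd⟩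
    rw [List.map_cons, List.sum_cons, ih hnd, countP_mem_cons t ts pre ht]
    push_cast
    ring

lemma countP_take_eq_sum (xs : List Int) (m : Nat) (hm : m ≤ xs.length)
    (p : Int → Prop) [DecidablePred p] :
    (((xs.take m).countP (fun x => decide (p x)) : Int)) =
      ∑ i ∈ Finset.Ico (0:Int) (m:Int), if p (PySem.List.pyGetD xs i 0) then 1 else 0 := by
  rw [sum_Ico_int_eq_range]
  induction m with
  | zero => simp
  | succ m ih =>
    have hm' : m < xs.length := by omega
    rw [Finset.sum_range_succ, ← ih (by omega), List.take_add_one,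
      List.getElem?_eq_getElem hm', Option.toList_some, List.countP_append]
    have ha : PySem.List.pyGetD xs (m:Int) 0 = xs[m] := by
      simp [PySem.List.pyGetD_natCast, List.getD_eq_getElem?_getD, List.getElem?_eq_getElem hm']
    rw [ha]
    by_cases hp : p xs[m] <;> simp [hp]

-- B's pair contribution counts exactly the admissible earlier indices
lemma pvTerm_eq (xs : List Int) (j k : Int) (h0 : 0 ≤ j) (hjl : j ≤ (xs.length:Int)) :
    pvTerm xs j k =
      ∑ i ∈ Finset.Ico (0:Int) j,
        if pvP (PySem.List.pyGetD xs i 0) (PySem.List.pyGetD xs j 0) (PySem.List.pyGetD xs k 0)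
        then 1 else 0 := by
  unfold pvTerm
  set a := PySem.List.pyGetD xs j 0 with ha
  set b := PySem.List.pyGetD xs k 0 with hb
  split_ifs with h
  · have hall : ∀ i ∈ Finset.Ico (0:Int) j,
        (if pvP (PySem.List.pyGetD xs i 0) a b then (1:Int) else 0) = 1 := by
      intro i _
      rw [if_pos]
      unfold pvP
      exact Or.inl (by rw [h.1, h.2, mul_zero])
    rw [Finset.sum_congr rfl hall, Finset.sum_const, Int.card_Ico]
    simp
    omega
  · rw [sum_counts _ _ (nodup_pvTargets a b)]
    have hcong : (xs.take j.toNat).countP (fun x => decide (x ∈ pvTargets a b)) =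
        (xs.take j.toNat).countP (fun x => decide (pvP x a b)) := by
      apply List.countP_congr
      intro x _
      simp [mem_pvTargets a b x h]
    rw [hcong]
    have hres := countP_take_eq_sum xs j.toNat (by omega) (fun x => pvP x a b)
    rw [Int.toNat_of_nonneg h0] at hres
    exact hres

-- invariant of B's outer loop: the dict is the counter of the processed prefix,
-- the accumulator is the sum of the per-iteration contributions
lemma B_fold (xs : List Int) (m : Nat) (hm : m ≤ xs.length) :
    (PySem.List.pyRange 0 (m:Int) 1).foldl
      (fun (st : PySem.Dict Int Int × Int) j =>
        let cnt := st.1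
        let a := PySem.List.pyGetD xs j 0
        let total := (PySem.List.pyRange (j + 1) (xs.length : Int) 1).foldl
          (fun total k =>
            let b := PySem.List.pyGetD xs k 0
            if a = 0 ∧ b = 0 then total + j
            else (pvTargets a b).foldl (fun tot t => tot + cnt.getD t 0) total)
          st.2
        (cnt.insert a (cnt.getD a 0 + 1), total))
      (PySem.Dict.empty, 0)
    = (PySem.Dict.counter (xs.take m), ∑ j ∈ Finset.range m, pvC xs (j:Int)) := by
  induction m with
  | zero =>
    simp [PySem.List.pyRange_one_eq_nil (le_refl (0:Int))]
    rfl
  | succ m ih =>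
    have hm' : m < xs.length := by omega
    have hc : ((m+1:Nat):Int) = (m:Int)+1 := by push_cast; ring
    rw [hc, PySem.List.pyRange_one_succ_right (by positivity), List.foldl_append,
      ih (by omega)]
    dsimp only [List.foldl]
    have hbody : ∀ (total k : Int),
        (if PySem.List.pyGetD xs (m:Int) 0 = 0 ∧ PySem.List.pyGetD xs k 0 = 0 then total + (m:Int)
         else (pvTargets (PySem.List.pyGetD xs (m:Int) 0) (PySem.List.pyGetD xs k 0)).foldl
            (fun tot t => tot + (PySem.Dict.counter (xs.take m)).getD t 0) total)
        = total + pvTerm xs (m:Int) k := by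
      intro total k
      unfold pvTerm
      split_ifs with h
      · rfl
      · rw [PySem.List.foldl_add]
        congr 2
        apply List.map_congr_left
        intro t _
        simp [PySem.Dict.getD_counter]
    have hfun : (fun (total k : Int) =>
        (if PySem.List.pyGetD xs (m:Int) 0 = 0 ∧ PySem.List.pyGetD xs k 0 = 0 then total + (m:Int)
         else (pvTargets (PySem.List.pyGetD xs (m:Int) 0) (PySem.List.pyGetD xs k 0)).foldl
            (fun tot t => tot + (PySem.Dict.counter (xs.take m)).getD t 0) total))
        = fun total k => total + pvTerm xs (m:Int) k :=
      funext fun t => funext fun k => hbody t k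
    have ha : PySem.List.pyGetD xs (m:Int) 0 = xs[m] := by
      simp [PySem.List.pyGetD_natCast, List.getD_eq_getElem?_getD, List.getElem?_eq_getElem hm']
    have hd : (PySem.Dict.counter (xs.take m)).insert (PySem.List.pyGetD xs (m:Int) 0)
        ((PySem.Dict.counter (xs.take m)).getD (PySem.List.pyGetD xs (m:Int) 0) 0 + 1)
        = PySem.Dict.counter (xs.take (m+1)) := by
      rw [List.take_add_one, List.getElem?_eq_getElem hm', Option.toList_some,
        PySem.Dict.counter_append_singleton, ha]
      rfl
    rw [hfun, PySem.List.foldl_add, hd, Finset.sum_range_succ]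
    rfl

lemma B_eq (n : Int) (nums : List Int) (hn3 : ¬ n < 3) :
    count_triplet_alt n nums =
      ∑ j ∈ Finset.range (PySem.List.slice nums none (some n)).length,
        pvC (PySem.List.slice nums none (some n)) (j:Int) := by
  unfold count_triplet_alt
  rw [if_neg hn3]
  exact congrArg Prod.snd (B_fold (PySem.List.slice nums none (some n)) _ le_rfl)

lemma side_A (n : Int) (f : Int → Int → Int → Int) :
    ∑ i ∈ Finset.Ico (0:Int) (n-2), ∑ j ∈ Finset.Ico (i+1) (n-1), ∑ k ∈ Finset.Ico (j+1) n, f i j k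
      = ∑ i ∈ Finset.Ico (0:Int) n, ∑ j ∈ Finset.Ico (0:Int) n, ∑ k ∈ Finset.Ico (0:Int) n,
          if i < j ∧ j < k then f i j k else 0 := by
  rw [sum_Ico_extend _ 0 (n-2) n le_rfl (by omega)]
  apply Finset.sum_congr rfl
  intro i hi
  simp only [Finset.mem_Ico] at hi
  by_cases hcond : 0 ≤ i ∧ i < n-2
  · rw [if_pos hcond, sum_Ico_extend _ (i+1) (n-1) n (by omega) (by omega)]
    apply Finset.sum_congr rfl
    intro j hj
    simp only [Finset.mem_Ico] at hj
    by_cases hj2 : i+1 ≤ j ∧ j < n-1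
    · rw [if_pos hj2, sum_Ico_extend _ (j+1) n n (by omega) le_rfl]
      apply Finset.sum_congr rfl
      intro k hk
      simp only [Finset.mem_Ico] at hk
      by_cases hk2 : j+1 ≤ k ∧ k < n
      · rw [if_pos hk2, if_pos (by omega)]
      · rw [if_neg hk2, if_neg (by omega)]
    · rw [if_neg hj2]
      symm
      apply Finset.sum_eq_zero
      intro k hk
      simp only [Finset.mem_Ico] at hk
      rw [if_neg (by omega)]
  · rw [if_neg hcond]
    symm
    apply Finset.sum_eq_zero
    intro j hj
    apply Finset.sum_eq_zero
    intro k hk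
    simp only [Finset.mem_Ico] at hj hk
    rw [if_neg (by omega)]

lemma side_B (n : Int) (f : Int → Int → Int → Int) :
    ∑ j ∈ Finset.Ico (0:Int) n, ∑ k ∈ Finset.Ico (j+1) n, ∑ i ∈ Finset.Ico (0:Int) j, f i j k
      = ∑ j ∈ Finset.Ico (0:Int) n, ∑ k ∈ Finset.Ico (0:Int) n, ∑ i ∈ Finset.Ico (0:Int) n,
          if i < j ∧ j < k then f i j k else 0 := by
  apply Finset.sum_congr rfl
  intro j hj
  simp only [Finset.mem_Ico] at hj
  rw [sum_Ico_extend _ (j+1) n n (by omega) le_rfl]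
  apply Finset.sum_congr rfl
  intro k hk
  simp only [Finset.mem_Ico] at hk
  by_cases hk2 : j+1 ≤ k ∧ k < n
  · rw [if_pos hk2, sum_Ico_extend _ 0 j n le_rfl (by omega)]
    apply Finset.sum_congr rfl
    intro i hi
    simp only [Finset.mem_Ico] at hi
    by_cases hi2 : 0 ≤ i ∧ i < j
    · rw [if_pos hi2, if_pos (by omega)]
    · rw [if_neg hi2, if_neg (by omega)]
  · rw [if_neg hk2]
    symm
    apply Finset.sum_eq_zero
    intro i hi
    simp only [Finset.mem_Ico] at hi
    rw [if_neg (by omega)]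

-- A iterates i-outermost, B iterates j-outermost: both are the sum over the i<j<k cube
lemma triple_exchange (n : Int) (f : Int → Int → Int → Int) :
    ∑ i ∈ Finset.Ico (0:Int) (n-2), ∑ j ∈ Finset.Ico (i+1) (n-1), ∑ k ∈ Finset.Ico (j+1) n, f i j k
      = ∑ j ∈ Finset.Ico (0:Int) n, ∑ k ∈ Finset.Ico (j+1) n, ∑ i ∈ Finset.Ico (0:Int) j, f i j k := by
  rw [side_A, side_B, Finset.sum_comm]
  apply Finset.sum_congr rfl
  intro j _
  rw [Finset.sum_comm]

lemma pyGetD_take (nums : List Int) (n i : Int) (h0 : 0 ≤ i) (hin : i < n)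
    (hlen : n ≤ (nums.length:Int)) :
    PySem.List.pyGetD nums i 0 = PySem.List.pyGetD (nums.take n.toNat) i 0 := by
  rw [PySem.List.pyGetD_eq_getElem nums 0 h0 (by omega),
    PySem.List.pyGetD_eq_getElem (nums.take n.toNat) 0 h0
      (by simp only [List.length_take]; omega)]
  rw [List.getElem_take]

-- ===== VERDICT (by name: the statement is the Claim_ definition above) =====
theorem count_triplet_spec : Claim_equal_count_triplet := by
  unfold Claim_equal_count_triplet Spec_count_triplet Pre_count_triplet
  intro n nums _ hpre
  by_cases hn3 : n < 3
  · rw [A_eq_sum]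
    unfold count_triplet_alt
    rw [if_pos hn3, Finset.Ico_eq_empty (by omega), Finset.sum_empty]
  · have hlen : n ≤ (nums.length:Int) := hpre (by omega)
    rw [A_eq_sum, B_eq n nums hn3]
    set xs := PySem.List.slice nums none (some n) with hxsdef
    have hxs : xs = nums.take n.toNat := PySem.List.slice_to nums (by omega)
    have hlenx : (xs.length : Int) = n := by
      rw [hxs, List.length_take]
      simp
      omega
    rw [← sum_Ico_int_eq_range xs.length (fun j => pvC xs j), hlenx]
    have hB : ∀ j ∈ Finset.Ico (0:Int) n, pvC xs j =
        ∑ k ∈ Finset.Ico (j+1) n, ∑ i ∈ Finset.Ico (0:Int) j,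
          (if pvP (PySem.List.pyGetD xs i 0) (PySem.List.pyGetD xs j 0) (PySem.List.pyGetD xs k 0)
           then 1 else 0) := by
      intro j hj
      simp only [Finset.mem_Ico] at hj
      unfold pvC
      rw [sum_pyRange, hlenx]
      apply Finset.sum_congr rfl
      intro k hk
      simp only [Finset.mem_Ico] at hk
      exact pvTerm_eq xs j k hj.1 (by omega)
    rw [Finset.sum_congr rfl hB]
    have hA : ∀ i ∈ Finset.Ico (0:Int) (n-2),
        (∑ j ∈ Finset.Ico (i+1) (n-1), ∑ k ∈ Finset.Ico (j+1) n,
          (if pvP (PySem.List.pyGetD nums i 0) (PySem.List.pyGetD nums j 0) (PySem.List.pyGetD nums k 0)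
           then (1:Int) else 0)) =
        (∑ j ∈ Finset.Ico (i+1) (n-1), ∑ k ∈ Finset.Ico (j+1) n,
          (if pvP (PySem.List.pyGetD xs i 0) (PySem.List.pyGetD xs j 0) (PySem.List.pyGetD xs k 0)
           then (1:Int) else 0)) := by
      intro i hi
      simp only [Finset.mem_Ico] at hi
      apply Finset.sum_congr rfl
      intro j hj
      simp only [Finset.mem_Ico] at hj
      apply Finset.sum_congr rfl
      intro k hk
      simp only [Finset.mem_Ico] at hk
      rw [pyGetD_take nums n i (by omega) (by omega) hlen,
        pyGetD_take nums n j (by omega) (by omega) hlen,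
        pyGetD_take nums n k (by omega) (by omega) hlen, hxs]
    rw [Finset.sum_congr rfl hA]
    exact triple_exchange n (fun i j k =>
      if pvP (PySem.List.pyGetD xs i 0) (PySem.List.pyGetD xs j 0) (PySem.List.pyGetD xs k 0)
      then 1 else 0)
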